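-- pv_equiv track=rewrite | github.com/Commonjava/charon | mrrc/pkgs/maven.py | parse_gavs
-- ===== SOURCE A (Python) =====
-- from typing import Dict, List, Tuple
--
-- def __parse_gav(full_artifact_path: str, root="/") -> Tuple[str, str, str]:
--     """Parse maven groupId, artifactId and version from a standard path in a local maven repo.
--     e.g: org/apache/maven/plugin/maven-plugin-plugin/1.0.0/maven-plugin-plugin-1.0.0.pom
--     -> (org.apache.maven.plugin, maven-plugin-plugin, 1.0.0)
--     root is like a prefix of the path which is not part of the maven GAV
--     """
--     slash_root = root
--     if not root.endswith("/"):
--         slash_root = slash_root + "/"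
--
--     ver_path = full_artifact_path
--     if ver_path.startswith(slash_root):
--         ver_path = ver_path[len(slash_root):]
--     if ver_path.endswith("/"):
--         ver_path = ver_path[:-1]
--
--     items = ver_path.split("/")
--     version = items[-2]
--     artifact = items[-3]
--     group = ".".join(items[:-3])
--
--     return group, artifact, version
--
-- def parse_gavs(pom_paths: List[str], root="/") -> Dict[str, Dict[str, List[str]]]:
--     """Give a list of paths with pom files and parse the maven groupId, artifactId and version
--     from them. The result will be a dict like {groupId: {artifactId: [versions list]}}.
--     Root is like a prefix of the path which is not part of the maven GAV
--     """
--     gavs = dict()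
--     for pom in pom_paths:
--         (g, a, v) = __parse_gav(pom, root)
--         avs = gavs.get(g, dict())
--         vers = avs.get(a, list())
--         vers.append(v)
--         avs[a] = vers
--         gavs[g] = avs
--     return gavs
-- ===== SOURCE B (Python) =====
-- from typing import Dict, List, Tuple
--
--
-- def _gav(path: str, prefix: str) -> Tuple[str, str, str]:
--     """Parse one maven path (with the root prefix already normalized) into
--     its (groupId, artifactId, version) triple."""
--     q = path[len(prefix):] if path.startswith(prefix) else path
--     if q.endswith("/"):
--         q = q[:-1]
--     items = q.split("/")
--     return ".".join(items[:-3]), items[-3], items[-2]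
--
--
-- def parse_gavs(pom_paths: List[str], root="/") -> Dict[str, Dict[str, List[str]]]:
--     """Two-pass re-implementation: first map every path to its (group, artifact,
--     version) triple, then assemble the nested dict by ordered key deduplication
--     (dict.fromkeys keeps first-occurrence order) and filtering scans."""
--     prefix = root if root.endswith("/") else root + "/"
--     triples = [_gav(p, prefix) for p in pom_paths]
--     groups = list(dict.fromkeys(g for g, _, _ in triples))
--     return {
--         g: {
--             a: [v2 for g2, a2, v2 in triples if g2 == g and a2 == a]
--             for a in dict.fromkeys(a2 for g2, a2, _ in triples if g2 == g)
--         }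
--         for g in groups
--     }
-- ===== Notes on version B (the rewrite author's own statement) =====
-- stated objective: alternative
-- what changed: Replaces A's incremental dict.get/mutate accumulation with a two-pass build: map every path to its (group, artifact, version) triple, then assemble the nested dict by ordered key deduplication (dict.fromkeys) plus filtering scans.
import Mathlib
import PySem

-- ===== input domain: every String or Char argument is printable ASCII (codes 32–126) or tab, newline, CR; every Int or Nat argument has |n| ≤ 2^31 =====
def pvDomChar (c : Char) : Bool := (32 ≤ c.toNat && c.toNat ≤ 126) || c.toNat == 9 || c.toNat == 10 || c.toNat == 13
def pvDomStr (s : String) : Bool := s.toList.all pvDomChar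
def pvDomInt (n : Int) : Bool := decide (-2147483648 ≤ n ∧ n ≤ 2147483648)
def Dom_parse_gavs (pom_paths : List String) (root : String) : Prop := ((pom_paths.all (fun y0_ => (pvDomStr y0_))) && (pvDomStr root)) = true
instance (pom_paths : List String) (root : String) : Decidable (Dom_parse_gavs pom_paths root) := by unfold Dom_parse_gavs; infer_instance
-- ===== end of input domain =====

-- B replaces A's incremental dict accumulation by a two-pass build (triples, then
-- ordered key dedup + filtering scans); alternative decomposition, same results.


-- ===== PORT A =====
-- __parse_gav; items[-2] / items[-3] raise IndexError when the split has < 3 pieces: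
-- those inputs are excluded by Pre_parse_gavs below (the port uses pyGetD with a dummy default there).
def parseGav (full_artifact_path : String) (root : String) : String × String × String :=
  let slash_root : List Char :=
    if PySem.Chars.endswith root.toList ['/'] then root.toList else root.toList ++ ['/']
  let ver_path0 : List Char :=
    if PySem.Chars.startswith full_artifact_path.toList slash_root then
      PySem.List.slice full_artifact_path.toList (some (slash_root.length : Int)) none
    else full_artifact_path.toList
  let ver_path : List Char :=
    if PySem.Chars.endswith ver_path0 ['/'] then PySem.List.slice ver_path0 none (some (-1))
    else ver_path0
  let items := PySem.Chars.splitOn ver_path ['/']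
  let version := PySem.List.pyGetD items (-2) []
  let artifact := PySem.List.pyGetD items (-3) []
  let group := PySem.Chars.join ['.'] (PySem.List.slice items none (some (-3)))
  (String.ofList group, String.ofList artifact, String.ofList version)

def parse_gavs (pom_paths : List String) (root : String) : List (String × List (String × List String)) :=
  let gavs : PySem.Dict String (PySem.Dict String (List String)) :=
    pom_paths.foldl (fun gavs pom =>
      let t := parseGav pom root
      let avs := gavs.getD t.1 PySem.Dict.empty
      let vers := avs.getD t.2.1 []
      gavs.insert t.1 (avs.insert t.2.1 (vers ++ [t.2.2]))) PySem.Dict.empty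
  gavs.items.map (fun q => (q.1, q.2.items))

-- ===== PORT B =====
-- _gav of Source B: the root pfx is normalized once by the caller
def gavB (path : String) (pfx : List Char) : String × String × String :=
  let q0 : List Char :=
    if PySem.Chars.startswith path.toList pfx then
      PySem.List.slice path.toList (some (pfx.length : Int)) none
    else path.toList
  let q : List Char :=
    if PySem.Chars.endswith q0 ['/'] then PySem.List.slice q0 none (some (-1)) else q0
  let items := PySem.Chars.splitOn q ['/']
  (String.ofList (PySem.Chars.join ['.'] (PySem.List.slice items none (some (-3)))),
   String.ofList (PySem.List.pyGetD items (-3) []),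
   String.ofList (PySem.List.pyGetD items (-2) []))

def parse_gavs_alt (pom_paths : List String) (root : String) : List (String × List (String × List String)) :=
  let pfx : List Char :=
    if PySem.Chars.endswith root.toList ['/'] then root.toList else root.toList ++ ['/']
  let triples := pom_paths.map (fun p => gavB p pfx)
  (PySem.List.dedup (triples.map (·.1))).map (fun g =>
    (g, (PySem.List.dedup ((triples.filter (fun t => t.1 == g)).map (fun t => t.2.1))).map (fun a =>
          (a, (triples.filter (fun t => t.1 == g && t.2.1 == a)).map (fun t => t.2.2)))))

-- ===== PRECONDITION & SPEC =====
-- helper for Pre_ only: the path after stripping the normalized root pfx and a trailing slash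
def pvStripped (p : String) (root : String) : List Char :=
  let sr : List Char :=
    if PySem.Chars.endswith root.toList ['/'] then root.toList else root.toList ++ ['/']
  let v0 : List Char :=
    if PySem.Chars.startswith p.toList sr then p.toList.drop sr.length else p.toList
  if PySem.Chars.endswith v0 ['/'] then v0.dropLast else v0

-- Pre_ excludes exactly the inputs where Python A raises IndexError: a path whose
-- stripped form splits into fewer than 3 '/'-separated pieces.
def Pre_parse_gavs (pom_paths : List String) (root : String) : Prop :=
  ∀ p ∈ pom_paths, 3 ≤ (PySem.Chars.splitOn (pvStripped p root) ['/']).length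
instance (pom_paths : List String) (root : String) : Decidable (Pre_parse_gavs pom_paths root) := by
  unfold Pre_parse_gavs; infer_instance

def pvWitness_parse_gavs : List String × String := (["org/foo/1.0/foo-1.0.pom"], "/")

def Spec_parse_gavs (pom_paths : List String) (root : String) (out : List (String × List (String × List String))) : Prop := out = parse_gavs_alt pom_paths root
instance (pom_paths : List String) (root : String) (out : List (String × List (String × List String))) : Decidable (Spec_parse_gavs pom_paths root out) := by unfold Spec_parse_gavs; infer_instance

-- ===== CLAIM (what is proved, stated in full; the proofs are below) =====
def Claim_equal_parse_gavs : Prop := ∀ (pom_paths : List String) (root : String), Dom_parse_gavs pom_paths root → Pre_parse_gavs pom_paths root → Spec_parse_gavs pom_paths root (parse_gavs pom_paths root)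

-- ===== LEMMAS AND PROOFS =====

-- abbreviations for the two fold steps of port A (proof-side only)
def stepI (d : PySem.Dict String (List String)) (t : String × String × String) :
    PySem.Dict String (List String) :=
  d.insert t.2.1 (d.getD t.2.1 [] ++ [t.2.2])

def stepA (d : PySem.Dict String (PySem.Dict String (List String)))
    (t : String × String × String) : PySem.Dict String (PySem.Dict String (List String)) :=
  d.insert t.1 ((d.getD t.1 PySem.Dict.empty).insert t.2.1
    ((d.getD t.1 PySem.Dict.empty).getD t.2.1 [] ++ [t.2.2]))

theorem outer_getD (ts : List (String × String × String))
    (d : PySem.Dict String (PySem.Dict String (List String))) (g : String) :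
    (ts.foldl stepA d).getD g PySem.Dict.empty =
      (ts.filter (fun t => t.1 == g)).foldl stepI (d.getD g PySem.Dict.empty) := by
  induction ts generalizing d with
  | nil => rfl
  | cons t ts ih =>
    rw [List.foldl_cons]
    by_cases h : t.1 = g
    · have hb : (t.1 == g) = true := by simp [h]
      simp only [List.filter_cons, hb, if_true, List.foldl_cons]
      rw [ih]
      congr 1
      subst h
      simp [stepA, stepI, PySem.Dict.getD_insert_self]
    · have hb : (t.1 == g) = false := by simp [h]
      simp only [List.filter_cons, hb, Bool.false_eq_true, if_false]
      rw [ih]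
      congr 1
      simp [stepA, PySem.Dict.getD_insert_of_ne _ _ _ (Ne.symm h)]

theorem inner_getD (ts : List (String × String × String))
    (d : PySem.Dict String (List String)) (a : String) :
    (ts.foldl stepI d).getD a [] =
      d.getD a [] ++ (ts.filter (fun t => t.2.1 == a)).map (fun t => t.2.2) := by
  have h1 : ts.foldl stepI d =
      (ts.map (fun t => (t.2.1, t.2.2))).foldl
        (fun d p => d.modify p.1 [] (fun x => x ++ [p.2])) d := by
    rw [List.foldl_map]; rfl
  rw [h1, PySem.Dict.getD_foldl_modify_append]
  simp [List.filter_map, Function.comp_def]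

theorem inner_keys (ts : List (String × String × String)) :
    (ts.foldl stepI PySem.Dict.empty).keys = PySem.List.dedup (ts.map (fun t => t.2.1)) := by
  have := PySem.Dict.keys_foldl_insert_key ts (fun t => t.2.1)
    (fun d t => d.getD t.2.1 [] ++ [t.2.2]) PySem.Dict.empty
  simpa [PySem.Set.ofList_eq_foldl, PySem.Set.update, PySem.Dict.keys_empty] using this

theorem inner_nodup (ts : List (String × String × String)) :
    (ts.foldl stepI PySem.Dict.empty).keys.Nodup := by
  exact PySem.Dict.nodup_keys_foldl_insert_key ts (fun t => t.2.1)
    (fun d t => d.getD t.2.1 [] ++ [t.2.2]) PySem.Dict.empty (by simp [PySem.Dict.keys_empty])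

theorem outer_keys (ts : List (String × String × String)) :
    (ts.foldl stepA PySem.Dict.empty).keys = PySem.List.dedup (ts.map (fun t => t.1)) := by
  have := PySem.Dict.keys_foldl_insert_key ts (fun t => t.1)
    (fun d t => (d.getD t.1 PySem.Dict.empty).insert t.2.1
      ((d.getD t.1 PySem.Dict.empty).getD t.2.1 [] ++ [t.2.2])) PySem.Dict.empty
  simpa [PySem.Set.ofList_eq_foldl, PySem.Set.update, PySem.Dict.keys_empty] using this

theorem outer_nodup (ts : List (String × String × String)) :
    (ts.foldl stepA PySem.Dict.empty).keys.Nodup := by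
  exact PySem.Dict.nodup_keys_foldl_insert_key ts (fun t => t.1)
    (fun d t => (d.getD t.1 PySem.Dict.empty).insert t.2.1
      ((d.getD t.1 PySem.Dict.empty).getD t.2.1 [] ++ [t.2.2])) PySem.Dict.empty
    (by simp [PySem.Dict.keys_empty])

theorem inner_items (ps : List (String × String × String)) :
    (ps.foldl stepI PySem.Dict.empty).items =
      (PySem.List.dedup (ps.map (fun t => t.2.1))).map (fun a =>
        (a, (ps.filter (fun t => t.2.1 == a)).map (fun t => t.2.2))) := by
  rw [PySem.Dict.items_eq_map_keys _ (inner_nodup ps) [], inner_keys]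
  refine List.map_congr_left (fun a _ => ?_)
  rw [inner_getD]
  simp [PySem.Dict.getD_empty]

-- ===== VERDICT (by name: the statement is the Claim_ definition above) =====
theorem parse_gavs_spec : Claim_equal_parse_gavs := by
  intro pom_paths root _ _
  unfold Spec_parse_gavs parse_gavs parse_gavs_alt
  simp only
  set pfx := (if PySem.Chars.endswith root.toList ['/'] then root.toList
                 else root.toList ++ ['/']) with hpre
  set ts := pom_paths.map (fun p => gavB p pfx) with hts
  have hfold : pom_paths.foldl (fun gavs pom =>
      let t := parseGav pom root
      let avs := gavs.getD t.1 PySem.Dict.empty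
      let vers := avs.getD t.2.1 []
      gavs.insert t.1 (avs.insert t.2.1 (vers ++ [t.2.2]))) PySem.Dict.empty =
      ts.foldl stepA PySem.Dict.empty := by
    rw [hts, List.foldl_map]
    rfl
  rw [hfold]
  rw [PySem.Dict.items_eq_map_keys _ (outer_nodup ts) PySem.Dict.empty, outer_keys]
  rw [List.map_map]
  refine List.map_congr_left (fun g _ => ?_)
  simp only [Function.comp_def]
  rw [outer_getD, PySem.Dict.getD_empty, inner_items]
  simp only [List.filter_filter, Bool.and_comm]
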